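-- pv_equiv track=rewrite | github.com/yann-zhong/GENOM_BIM | src/find_HC.py | get_Q_codes
-- ===== SOURCE A (Python) =====
-- def get_Q_codes(hc):
--     hc=bin(hc)
--     Q_code =''
--     for i in range(len(hc)-1):
--         if hc[i:i+2]=='11':
--             Q_code+='V'
--         elif hc[i:i+3]=='101':
--             Q_code+='M'
--         elif hc[i:i+4]=='1001':
--             Q_code+='U'
--         elif hc[i:i+5]=='10001':
--             Q_code+='D'
--     return Q_code
-- ===== SOURCE B (Python) =====
-- def get_Q_codes(hc):
--     s = bin(hc)
--     ones = [i for i, c in enumerate(s) if c == '1']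
--     codes = {1: 'V', 2: 'M', 3: 'U', 4: 'D'}
--     return ''.join(codes.get(b - a, '') for a, b in zip(ones, ones[1:]))
-- ===== Notes on version B (the rewrite author's own statement) =====
-- stated objective: alternative
-- what changed: Replaces A's sliding-window scan that compares a 2..5-char slice of bin(hc) against four patterns at every position with a set-bit-index pass: collect the indices of '1' characters once, then map each consecutive gap (1..4) through a dict to its Q-code letter.
import Mathlib
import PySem

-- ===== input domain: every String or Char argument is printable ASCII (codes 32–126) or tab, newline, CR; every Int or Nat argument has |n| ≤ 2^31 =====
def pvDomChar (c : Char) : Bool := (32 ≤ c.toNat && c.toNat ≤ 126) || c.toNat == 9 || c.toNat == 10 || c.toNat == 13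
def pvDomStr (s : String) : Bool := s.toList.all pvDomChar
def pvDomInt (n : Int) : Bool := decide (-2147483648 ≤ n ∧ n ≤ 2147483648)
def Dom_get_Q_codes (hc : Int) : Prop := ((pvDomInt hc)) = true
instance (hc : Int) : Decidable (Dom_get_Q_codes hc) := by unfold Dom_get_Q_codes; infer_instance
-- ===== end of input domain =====

-- B replaces A's sliding-window slice comparison over bin(hc) with a set-bit-index pass
-- (indices of '1' chars, then one code per consecutive gap); alternative decomposition, same cost.

-- ===== PORT A =====
def get_Q_codes (hc : Int) : String :=
  let s : List Char := PySem.Int.toBinChars0b hc        -- hc = bin(hc)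
  let q : List Char :=
    (PySem.List.pyRange 0 (PySem.List.len s - 1) 1).foldl (fun acc i =>
      if PySem.List.slice s (some i) (some (i + 2)) = ['1', '1'] then acc ++ ['V']
      else if PySem.List.slice s (some i) (some (i + 3)) = ['1', '0', '1'] then acc ++ ['M']
      else if PySem.List.slice s (some i) (some (i + 4)) = ['1', '0', '0', '1'] then acc ++ ['U']
      else if PySem.List.slice s (some i) (some (i + 5)) = ['1', '0', '0', '0', '1'] then acc ++ ['D']
      else acc) []
  String.ofList q

-- ===== PORT B =====
def get_Q_codes_alt (hc : Int) : String :=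
  let s : List Char := PySem.Int.toBinChars0b hc        -- s = bin(hc)
  let ones : List Int :=
    (PySem.List.enumerate s).filterMap (fun p => if p.2 = '1' then some p.1 else none)
  let codes : PySem.Dict Int (List Char) :=
    PySem.Dict.ofList [(1, ['V']), (2, ['M']), (3, ['U']), (4, ['D'])]
  String.ofList (((ones.zip ones.tail).map (fun p => PySem.Dict.getD codes (p.2 - p.1) [])).flatten)

-- ===== PRECONDITION & SPEC =====
def Spec_get_Q_codes (hc : Int) (out : String) : Prop := out = get_Q_codes_alt hc
instance (hc : Int) (out : String) : Decidable (Spec_get_Q_codes hc out) := by unfold Spec_get_Q_codes; infer_instance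

-- ===== CLAIM (what is proved, stated in full; the proofs are below) =====
def Claim_equal_get_Q_codes : Prop := ∀ (hc : Int), Dom_get_Q_codes hc → Spec_get_Q_codes hc (get_Q_codes hc)

-- ===== LEMMAS AND PROOFS =====

-- what A emits at one window position (the first ≤5 chars of the suffix)
def emitA (s : List Char) : List Char :=
  if s.take 2 = ['1', '1'] then ['V']
  else if s.take 3 = ['1', '0', '1'] then ['M']
  else if s.take 4 = ['1', '0', '0', '1'] then ['U']
  else if s.take 5 = ['1', '0', '0', '0', '1'] then ['D']
  else []

-- A as a recursion over suffixes
def scanA : List Char → List Char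
  | [] => []
  | c :: t => emitA (c :: t) ++ scanA t

-- the letter for a gap between consecutive set bits
def gapCode (d : Int) : List Char :=
  if d = 1 then ['V'] else if d = 2 then ['M'] else if d = 3 then ['U'] else if d = 4 then ['D'] else []

-- B as a recursion: at each '1', the code for the distance to the next '1'
def scanB : List Char → List Char
  | [] => []
  | c :: t =>
      (if c = '1' then
        match t.findIdx? (fun c => c = '1') with
        | some j => gapCode ((j : Int) + 1)
        | none => []
      else []) ++ scanB t

-- the indices of '1' chars, starting at offset k
def onesIdx (k : Int) : List Char → List Int
  | [] => []
  | c :: t => (if c = '1' then [k] else []) ++ onesIdx (k + 1) t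

def pairsOut (xs : List Int) : List Char :=
  ((xs.zip xs.tail).map (fun p => gapCode (p.2 - p.1))).flatten

theorem emitA_short (s : List Char) (h : s.length ≤ 1) : emitA s = [] := by
  match s, h with
  | [], _ => rfl
  | [c], _ => simp [emitA]

theorem emitA_ne_one (c : Char) (t : List Char) (h : c ≠ '1') : emitA (c :: t) = [] := by
  simp [emitA, List.take_succ_cons, h]

theorem flatMap_range_emitA (s : List Char) :
    (List.range s.length).flatMap (fun k => emitA (s.drop k)) = scanA s := by
  induction s with
  | nil => rfl
  | cons c t ih =>
      rw [show (c :: t).length = t.length + 1 from rfl, List.range_succ_eq_map,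
        List.flatMap_cons, List.flatMap_map, scanA]
      exact congrArg (emitA (c :: t) ++ ·) ih

theorem A_to_scanA (s : List Char) :
    (PySem.List.pyRange 0 ((s.length : Int) - 1) 1).flatMap (fun i =>
        if PySem.List.slice s (some i) (some (i + 2)) = ['1', '1'] then ['V']
        else if PySem.List.slice s (some i) (some (i + 3)) = ['1', '0', '1'] then ['M']
        else if PySem.List.slice s (some i) (some (i + 4)) = ['1', '0', '0', '1'] then ['U']
        else if PySem.List.slice s (some i) (some (i + 5)) = ['1', '0', '0', '0', '1'] then ['D']
        else []) = scanA s := by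
  rw [PySem.List.pyRange_one, List.flatMap_map]
  have hstep : ∀ k : Nat,
      (if PySem.List.slice s (some ((0:Int) + k)) (some ((0:Int) + k + 2)) = ['1', '1'] then ['V']
       else if PySem.List.slice s (some ((0:Int) + k)) (some ((0:Int) + k + 3)) = ['1', '0', '1'] then ['M']
       else if PySem.List.slice s (some ((0:Int) + k)) (some ((0:Int) + k + 4)) = ['1', '0', '0', '1'] then ['U']
       else if PySem.List.slice s (some ((0:Int) + k)) (some ((0:Int) + k + 5)) = ['1', '0', '0', '0', '1'] then ['D']
       else []) = emitA (s.drop k) := by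
    intro k
    rw [zero_add,
        show ((k:Int) + 2) = (k:Int) + ((2:Nat):Int) by push_cast; ring,
        show ((k:Int) + 3) = (k:Int) + ((3:Nat):Int) by push_cast; ring,
        show ((k:Int) + 4) = (k:Int) + ((4:Nat):Int) by push_cast; ring,
        show ((k:Int) + 5) = (k:Int) + ((5:Nat):Int) by push_cast; ring,
        PySem.List.slice_natCast_add, PySem.List.slice_natCast_add,
        PySem.List.slice_natCast_add, PySem.List.slice_natCast_add]
    rfl
  simp only [hstep]
  rcases s with _ | ⟨c, t⟩
  · rfl
  · have hn : ((((c :: t).length : Int) - 1 - 0).toNat) = t.length := by simp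
    rw [hn, ← flatMap_range_emitA (c :: t),
      show (c :: t).length = t.length + 1 from rfl, List.range_succ, List.flatMap_append]
    have hlast : emitA ((c :: t).drop t.length) = [] :=
      emitA_short _ (by simp)
    simp [hlast]

theorem get_Q_codes_eq_scanA (hc : Int) :
    get_Q_codes hc = String.ofList (scanA (PySem.Int.toBinChars0b hc)) := by
  simp only [get_Q_codes, PySem.List.len_eq]
  congr 1
  rw [show (fun (acc : List Char) (i : Int) =>
      if PySem.List.slice (PySem.Int.toBinChars0b hc) (some i) (some (i + 2)) = ['1', '1'] then acc ++ ['V']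
      else if PySem.List.slice (PySem.Int.toBinChars0b hc) (some i) (some (i + 3)) = ['1', '0', '1'] then acc ++ ['M']
      else if PySem.List.slice (PySem.Int.toBinChars0b hc) (some i) (some (i + 4)) = ['1', '0', '0', '1'] then acc ++ ['U']
      else if PySem.List.slice (PySem.Int.toBinChars0b hc) (some i) (some (i + 5)) = ['1', '0', '0', '0', '1'] then acc ++ ['D']
      else acc) = (fun acc i => acc ++
      (if PySem.List.slice (PySem.Int.toBinChars0b hc) (some i) (some (i + 2)) = ['1', '1'] then ['V']
      else if PySem.List.slice (PySem.Int.toBinChars0b hc) (some i) (some (i + 3)) = ['1', '0', '1'] then ['M']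
      else if PySem.List.slice (PySem.Int.toBinChars0b hc) (some i) (some (i + 4)) = ['1', '0', '0', '1'] then ['U']
      else if PySem.List.slice (PySem.Int.toBinChars0b hc) (some i) (some (i + 5)) = ['1', '0', '0', '0', '1'] then ['D']
      else [])) from funext fun acc => funext fun i => by split_ifs <;> simp,
    PySem.List.foldl_append_eq_flatMap, List.nil_append]
  exact A_to_scanA (PySem.Int.toBinChars0b hc)

-- findIdx?/onesIdx correspondence
theorem onesIdx_spec (t : List Char) : ∀ (k : Int),
    (t.findIdx? (fun c => c = '1') = none ∧ onesIdx k t = []) ∨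
    (∃ (j : Nat) (ys : List Int), t.findIdx? (fun c => c = '1') = some j ∧
      onesIdx k t = (k + (j : Int)) :: ys) := by
  induction t with
  | nil => intro k; exact Or.inl ⟨rfl, rfl⟩
  | cons c t ih =>
      intro k
      by_cases hc : c = '1'
      · refine Or.inr ⟨0, onesIdx (k + 1) t, ?_, ?_⟩
        · simp [List.findIdx?_cons, hc]
        · simp [onesIdx, hc]
      · rcases ih (k + 1) with ⟨hf, ho⟩ | ⟨j, ys, hf, ho⟩
        · refine Or.inl ⟨?_, ?_⟩
          · simp [List.findIdx?_cons, hc, hf]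
          · simp [onesIdx, hc, ho]
        · refine Or.inr ⟨j + 1, ys, ?_, ?_⟩
          · simp [List.findIdx?_cons, hc, hf]
          · simp only [onesIdx, if_neg hc, List.nil_append, ho]
            congr 1
            push_cast
            ring

theorem pairsOut_onesIdx (s : List Char) : ∀ (k : Int), pairsOut (onesIdx k s) = scanB s := by
  induction s with
  | nil => intro k; rfl
  | cons c t ih =>
      intro k
      by_cases hc : c = '1'
      · subst hc
        rw [scanB, if_pos rfl]
        rcases onesIdx_spec t (k + 1) with ⟨hf, ho⟩ | ⟨j, ys, hf, ho⟩
        · have hsB : scanB t = [] := by rw [← ih (k + 1), ho]; rfl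
          rw [hf, hsB]
          simp [onesIdx, ho, pairsOut]
        · rw [show onesIdx k ('1' :: t) = k :: onesIdx (k + 1) t by simp [onesIdx]]
          rw [hf, ho]
          have htail : pairsOut ((k + 1 + (j:Int)) :: ys) = scanB t := by
            rw [← ho]; exact ih (k + 1)
          rw [show pairsOut (k :: (k + 1 + (j:Int)) :: ys)
              = gapCode ((k + 1 + (j:Int)) - k) ++ pairsOut ((k + 1 + (j:Int)) :: ys) by
            simp [pairsOut]]
          rw [htail, show (k + 1 + (j:Int)) - k = (j:Int) + 1 by ring]
      · rw [scanB, if_neg hc]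
        rw [show onesIdx k (c :: t) = onesIdx (k + 1) t by simp [onesIdx, hc]]
        simp [ih (k + 1)]

-- the central step: what A emits at a '1' is the gap code, provided the tail is binary
theorem emitA_eq_gap (t : List Char) (h : ∀ c ∈ t, c = '0' ∨ c = '1') :
    emitA ('1' :: t) =
      (match t.findIdx? (fun c => c = '1') with
       | some j => gapCode ((j : Int) + 1)
       | none => []) := by
  rcases t with _ | ⟨c1, t1⟩
  · decide
  rcases h c1 (by simp) with rfl | rfl
  case inr => simp [emitA, List.findIdx?_cons, gapCode, List.take]
  rcases t1 with _ | ⟨c2, t2⟩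
  · decide
  rcases h c2 (by simp) with rfl | rfl
  case inr => simp [emitA, List.findIdx?_cons, gapCode, List.take]
  rcases t2 with _ | ⟨c3, t3⟩
  · decide
  rcases h c3 (by simp) with rfl | rfl
  case inr => simp [emitA, List.findIdx?_cons, gapCode, List.take]
  rcases t3 with _ | ⟨c4, t4⟩
  · decide
  rcases h c4 (by simp) with rfl | rfl
  case inr => simp [emitA, List.findIdx?_cons, gapCode, List.take]
  -- all four chars after the leading '1' are '0'
  have hL : emitA ('1' :: '0' :: '0' :: '0' :: '0' :: t4) = [] := by
    simp [emitA, List.take]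
  rw [hL]
  cases hf : t4.findIdx? (fun c => c = '1') with
  | none => simp [List.findIdx?_cons, hf]
  | some j =>
      simp only [List.findIdx?_cons, hf, Option.map_some,
        show (('0':Char) = '1') = False by simp, if_false, decide_false, Bool.false_eq_true]
      simp only [gapCode]
      split_ifs <;> first | rfl | (exfalso; omega)

-- the invariant: from the first '1' on, all chars are binary digits
def BinSuffix (s : List Char) : Prop :=
  ∀ c ∈ s.dropWhile (fun c => !(c = '1')), c = '0' ∨ c = '1'

theorem scanA_eq_scanB (s : List Char) (h : BinSuffix s) : scanA s = scanB s := by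
  induction s with
  | nil => rfl
  | cons c t ih =>
      by_cases hc : c = '1'
      · have hall : ∀ x ∈ (c :: t), x = '0' ∨ x = '1' := by
          have hdw : (c :: t).dropWhile (fun c => !(c = '1')) = c :: t := by
            simp [hc]
          intro x hx; exact h x (by rw [hdw]; exact hx)
        have ht : ∀ x ∈ t, x = '0' ∨ x = '1' := fun x hx => hall x (List.mem_cons_of_mem _ hx)
        have hBt : BinSuffix t := fun x hx => ht x ((List.dropWhile_sublist _).subset hx)
        rw [scanA, scanB, hc, emitA_eq_gap t ht, ih hBt]
        simp
      · have hBt : BinSuffix t := by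
          have hdw : (c :: t).dropWhile (fun c => !(c = '1')) = t.dropWhile (fun c => !(c = '1')) := by
            simp [hc]
          intro x hx; exact h x (by rw [hdw]; exact hx)
        rw [scanA, scanB, emitA_ne_one c t hc, ih hBt]
        simp [hc]

theorem toDigitsCore_binary (fuel : Nat) : ∀ (n : Nat) (ds : List Char),
    (∀ c ∈ ds, c = '0' ∨ c = '1') → ∀ c ∈ Nat.toDigitsCore 2 fuel n ds, c = '0' ∨ c = '1' := by
  induction fuel with
  | zero => intro n ds hds; exact hds
  | succ f ih =>
      intro n ds hds
      rw [Nat.toDigitsCore]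
      have hd : (n % 2).digitChar = '0' ∨ (n % 2).digitChar = '1' := by
        rcases Nat.mod_two_eq_zero_or_one n with h | h <;> rw [h] <;> simp [Nat.digitChar]
      have hds' : ∀ c ∈ (n % 2).digitChar :: ds, c = '0' ∨ c = '1' := by
        intro c hcm
        rcases List.mem_cons.mp hcm with rfl | hcm
        · exact hd
        · exact hds c hcm
      split
      · exact hds'
      · exact ih _ _ hds'

theorem binSuffix_toBinChars0b (n : Int) : BinSuffix (PySem.Int.toBinChars0b n) := by
  have hdig : ∀ (m : Nat), ∀ c ∈ Nat.toDigits 2 m, c = '0' ∨ c = '1' := fun m =>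
    toDigitsCore_binary (m + 1) m [] (by intro c hc; cases hc)
  unfold PySem.Int.toBinChars0b
  split
  · intro c hcm
    simp only [List.dropWhile_cons] at hcm
    norm_num at hcm
    exact hdig _ c ((List.dropWhile_sublist _).subset hcm)
  · intro c hcm
    simp only [List.dropWhile_cons] at hcm
    norm_num at hcm
    exact hdig _ c ((List.dropWhile_sublist _).subset hcm)

theorem filterMap_enumerate (s : List Char) : ∀ (k : Int),
    (PySem.List.enumerate s k).filterMap (fun p => if p.2 = '1' then some p.1 else none)
      = onesIdx k s := by
  induction s with
  | nil => intro k; rfl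
  | cons c t ih =>
      intro k
      rw [PySem.List.enumerate_cons, List.filterMap_cons]
      by_cases hc : c = '1' <;> simp [hc, onesIdx, ih]

theorem getD_codes (d : Int) :
    PySem.Dict.getD (PySem.Dict.ofList [((1:Int), ['V']), (2, ['M']), (3, ['U']), (4, ['D'])]) d []
      = gapCode d := by
  by_cases h1 : d = 1
  · subst h1; decide
  · by_cases h2 : d = 2
    · subst h2; decide
    · by_cases h3 : d = 3
      · subst h3; decide
      · by_cases h4 : d = 4
        · subst h4; decide
        · have e1 : ((1:Int) == d) = false := beq_eq_false_iff_ne.mpr (Ne.symm h1)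
          have e2 : ((2:Int) == d) = false := beq_eq_false_iff_ne.mpr (Ne.symm h2)
          have e3 : ((3:Int) == d) = false := beq_eq_false_iff_ne.mpr (Ne.symm h3)
          have e4 : ((4:Int) == d) = false := beq_eq_false_iff_ne.mpr (Ne.symm h4)
          have hmk : PySem.Dict.ofList [((1:Int), ['V']), (2, ['M']), (3, ['U']), (4, ['D'])]
             = PySem.Dict.mk [((1:Int), ['V']), (2, ['M']), (3, ['U']), (4, ['D'])] := by decide
          rw [PySem.Dict.getD, hmk]
          simp only [PySem.Dict.get?_mk_cons, e1, e2, e3, e4, if_false, Bool.false_eq_true]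
          simp [gapCode, h1, h2, h3, h4, PySem.Dict.get?]

theorem get_Q_codes_alt_eq_scanB (hc : Int) :
    get_Q_codes_alt hc = String.ofList (scanB (PySem.Int.toBinChars0b hc)) := by
  simp only [get_Q_codes_alt]
  rw [filterMap_enumerate]
  simp only [getD_codes]
  exact congrArg String.ofList (pairsOut_onesIdx (PySem.Int.toBinChars0b hc) 0)

-- ===== VERDICT (by name: the statement is the Claim_ definition above) =====
theorem get_Q_codes_spec : Claim_equal_get_Q_codes := by
  intro hc _
  show get_Q_codes hc = get_Q_codes_alt hc
  rw [get_Q_codes_eq_scanA, get_Q_codes_alt_eq_scanB,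
    scanA_eq_scanB _ (binSuffix_toBinChars0b hc)]
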